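-- pv_equiv track=rewrite | github.com/miramastoras/centrolign_analysis | scripts/get_aligned_bases_bed.py | build_aligned_intervals_from_ops
-- ===== SOURCE A (Python) =====
-- def build_aligned_intervals_from_ops(cigar_ops, start_pos):
--     """
--     Build aligned intervals (start, end) along coordinate system starting at start_pos.
--     """
--     intervals = []
--     pos = start_pos
--     for length, op in cigar_ops:
--         if op in ("M", "=", "X"):
--             intervals.append((pos, pos + length))
--             pos += length
--         elif op in ("D", "N"):  # Consume reference only
--             pos += length
--         else:  # I, S, H, P
--             # I consumes query in query coordinates
--             if op == "I":
--                 pos += length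
--             # S, H, P do not consume anything
--     return intervals
-- ===== SOURCE B (Python) =====
-- def build_aligned_intervals_from_ops(cigar_ops, start_pos):
--     """Two-pass: exclusive prefix sum of per-op advances, then select M/=/X intervals."""
--     advances = [length if op in ("M", "=", "X", "D", "N", "I") else 0
--                 for length, op in cigar_ops]
--     starts = []
--     p = start_pos
--     for a in advances:
--         starts.append(p)
--         p += a
--     return [(s, s + length)
--             for (length, op), s in zip(cigar_ops, starts)
--             if op in ("M", "=", "X")]
-- ===== Notes on version B (the rewrite author's own statement) =====
-- stated objective: alternative
-- what changed: Replaces the single interleaved loop (advance position and append in one pass) with a two-phase decomposition: an exclusive prefix sum of per-op coordinate advances computes every op's start position, then a zip+filter pass emits (start, start+length) for M/=/X ops.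
import Mathlib
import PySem

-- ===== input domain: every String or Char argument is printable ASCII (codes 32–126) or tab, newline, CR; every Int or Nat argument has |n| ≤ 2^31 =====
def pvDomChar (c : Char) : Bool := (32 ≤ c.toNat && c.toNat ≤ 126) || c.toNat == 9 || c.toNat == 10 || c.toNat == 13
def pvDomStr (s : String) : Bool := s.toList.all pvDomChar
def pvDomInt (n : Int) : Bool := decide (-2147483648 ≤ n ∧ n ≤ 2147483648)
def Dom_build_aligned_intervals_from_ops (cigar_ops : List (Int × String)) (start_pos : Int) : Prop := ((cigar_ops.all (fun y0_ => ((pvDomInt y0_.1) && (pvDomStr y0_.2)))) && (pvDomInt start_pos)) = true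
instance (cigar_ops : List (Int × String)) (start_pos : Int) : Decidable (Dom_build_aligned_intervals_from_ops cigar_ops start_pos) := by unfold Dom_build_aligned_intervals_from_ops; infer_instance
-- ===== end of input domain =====

-- B splits A's single interleaved loop into two phases (exclusive prefix sum of advances, then zip+filter to emit M/=/X intervals); same O(n) cost, alternative decomposition.


-- ===== PORT A =====
-- step of A's loop: state = (intervals so far, current position)
def pvStepA (st : List (Int × Int) × Int) (lo : Int × String) : List (Int × Int) × Int :=
  if lo.2 = "M" ∨ lo.2 = "=" ∨ lo.2 = "X" then
    (st.1 ++ [(st.2, st.2 + lo.1)], st.2 + lo.1)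
  else if lo.2 = "D" ∨ lo.2 = "N" then
    (st.1, st.2 + lo.1)
  else if lo.2 = "I" then
    (st.1, st.2 + lo.1)
  else
    st

def build_aligned_intervals_from_ops (cigar_ops : List (Int × String)) (start_pos : Int) : List (Int × Int) :=
  (cigar_ops.foldl pvStepA ([], start_pos)).1

-- ===== PORT B =====
-- how far an op advances the coordinate (0 for S/H/P and unknown ops)
def pvAdvance (lo : Int × String) : Int :=
  if lo.2 == "M" || lo.2 == "=" || lo.2 == "X" || lo.2 == "D" || lo.2 == "N" || lo.2 == "I" then lo.1 else 0

-- exclusive prefix sum seeded at p: start position of each op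
def pvStarts : List Int → Int → List Int
  | [], _ => []
  | a :: rest, p => p :: pvStarts rest (p + a)

def build_aligned_intervals_from_ops_alt (cigar_ops : List (Int × String)) (start_pos : Int) : List (Int × Int) :=
  ((cigar_ops.zip (pvStarts (cigar_ops.map pvAdvance) start_pos)).filter
    (fun x => x.1.2 == "M" || x.1.2 == "=" || x.1.2 == "X")).map
    (fun x => (x.2, x.2 + x.1.1))

-- ===== PRECONDITION & SPEC =====
def Spec_build_aligned_intervals_from_ops (cigar_ops : List (Int × String)) (start_pos : Int) (out : List (Int × Int)) : Prop := out = build_aligned_intervals_from_ops_alt cigar_ops start_pos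
instance (cigar_ops : List (Int × String)) (start_pos : Int) (out : List (Int × Int)) : Decidable (Spec_build_aligned_intervals_from_ops cigar_ops start_pos out) := by unfold Spec_build_aligned_intervals_from_ops; infer_instance

-- ===== CLAIM (what is proved, stated in full; the proofs are below) =====
def Claim_equal_build_aligned_intervals_from_ops : Prop := ∀ (cigar_ops : List (Int × String)) (start_pos : Int), Dom_build_aligned_intervals_from_ops cigar_ops start_pos → Spec_build_aligned_intervals_from_ops cigar_ops start_pos (build_aligned_intervals_from_ops cigar_ops start_pos)

-- ===== LEMMAS AND PROOFS =====

-- ===== VERDICT (by name: the statement is the Claim_ definition above) =====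
lemma alt_cons (l : Int) (op : String) (rest : List (Int × String)) (pos : Int) :
    build_aligned_intervals_from_ops_alt ((l, op) :: rest) pos =
      (if op == "M" || op == "=" || op == "X" then [(pos, pos + l)] else []) ++
        build_aligned_intervals_from_ops_alt rest (pos + pvAdvance (l, op)) := by
  simp only [build_aligned_intervals_from_ops_alt, List.map_cons, pvStarts, List.zip_cons_cons,
    List.filter_cons]
  by_cases h : (op == "M" || op == "=" || op == "X") = true
  · simp [h]
  · simp [h]

lemma foldlA_eq_alt : ∀ (ops : List (Int × String)) (acc : List (Int × Int)) (pos : Int),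
    (ops.foldl pvStepA (acc, pos)).1 = acc ++ build_aligned_intervals_from_ops_alt ops pos := by
  intro ops
  induction ops with
  | nil => intro acc pos; simp [build_aligned_intervals_from_ops_alt, pvStarts]
  | cons hd tl ih =>
    intro acc pos
    obtain ⟨l, op⟩ := hd
    rw [List.foldl_cons, alt_cons]
    by_cases hM : op = "M" <;> by_cases hE : op = "=" <;> by_cases hX : op = "X" <;>
      by_cases hD : op = "D" <;> by_cases hN : op = "N" <;> by_cases hI : op = "I" <;>
      simp_all [pvStepA, pvAdvance]

theorem build_aligned_intervals_from_ops_spec : Claim_equal_build_aligned_intervals_from_ops := by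
  intro cigar_ops start_pos _
  unfold Spec_build_aligned_intervals_from_ops build_aligned_intervals_from_ops
  simpa using foldlA_eq_alt cigar_ops [] start_pos
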